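-- pv_equiv track=rewrite | github.com/luxempig/sequoia-project | backend/tools/process_doc_with_drive_map.py | split_media_entries
-- ===== SOURCE A (Python) =====
-- from typing import List, Dict, Tuple, Optional
--
-- def split_media_entries(section_lines: List[str]) -> List[List[str]]:
--     """
--     Given lines of the Media section, split into entries:
--       - title: ...
--         credit: ...
--         date: ...
--         google_drive_link: ...
--         tags: ...
--     Each entry begins with '- ' at the start of a line.
--     Returns a list of list-of-lines (including their indentation).
--     """
--     entries: List[List[str]] = []
--     current: List[str] = []
--     for ln in section_lines:
--         if ln.lstrip().startswith("- "):
--             # new entry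
--             if current:
--                 entries.append(current)
--                 current = []
--             current.append(ln)
--         else:
--             if current:
--                 current.append(ln)
--     if current:
--         entries.append(current)
--     return entries
-- ===== SOURCE B (Python) =====
-- from typing import List
--
-- def split_media_entries(section_lines: List[str]) -> List[List[str]]:
--     marks = [i for i, ln in enumerate(section_lines) if ln.lstrip().startswith("- ")]
--     if not marks:
--         return []
--     bounds = marks + [len(section_lines)]
--     return [section_lines[bounds[k]:bounds[k + 1]] for k in range(len(marks))]
-- ===== Notes on version B (the rewrite author's own statement) =====
-- stated objective: alternative
-- what changed: Replaced the stateful one-pass accumulator (current/entries lists with conditional flushes) by an index-based decomposition: collect the positions of all marker lines, then slice the input between consecutive marker positions.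
import Mathlib
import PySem

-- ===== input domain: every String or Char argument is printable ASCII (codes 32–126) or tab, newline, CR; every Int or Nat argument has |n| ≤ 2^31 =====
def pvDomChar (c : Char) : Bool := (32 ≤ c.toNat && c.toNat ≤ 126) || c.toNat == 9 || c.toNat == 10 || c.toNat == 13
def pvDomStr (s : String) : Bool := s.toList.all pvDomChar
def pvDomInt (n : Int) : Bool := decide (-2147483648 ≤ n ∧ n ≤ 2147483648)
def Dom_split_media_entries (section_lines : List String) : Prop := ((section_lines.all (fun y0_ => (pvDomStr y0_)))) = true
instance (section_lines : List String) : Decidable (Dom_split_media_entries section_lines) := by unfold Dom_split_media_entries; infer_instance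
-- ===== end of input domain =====

-- B replaces A's stateful accumulator pass by slicing between collected marker indices (alternative decomposition, same cost).

-- shared helper: the marker test `ln.lstrip().startswith("- ")` both Pythons use
def pvM (ln : String) : Bool := PySem.Str.startswith (PySem.Str.lstrip ln) "- "

-- ===== PORT A =====
def split_media_entries (section_lines : List String) : List (List String) :=
  let st := section_lines.foldl
    (fun (st : List (List String) × List String) ln =>
      if pvM ln then
        ((if st.2 ≠ [] then st.1 ++ [st.2] else st.1), [ln])
      else
        (st.1, if st.2 ≠ [] then st.2 ++ [ln] else st.2))
    ([], [])
  if st.2 ≠ [] then st.1 ++ [st.2] else st.1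

-- ===== PORT B =====
-- bounds[k] / bounds[k+1] are always in range in Source B (k < len(marks), |bounds| = |marks|+1), so getD is exact here
def split_media_entries_alt (section_lines : List String) : List (List String) :=
  let marks := ((PySem.List.enumerate section_lines 0).filter (fun p => pvM p.2)).map (fun p => p.1)
  if marks.isEmpty then []
  else
    let bounds := marks ++ [(section_lines.length : Int)]
    (List.range marks.length).map (fun k =>
      PySem.List.slice section_lines (some (bounds.getD k 0)) (some (bounds.getD (k + 1) 0)))

-- ===== PRECONDITION & SPEC =====
def Spec_split_media_entries (section_lines : List String) (out : List (List String)) : Prop := out = split_media_entries_alt section_lines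
instance (section_lines : List String) (out : List (List String)) : Decidable (Spec_split_media_entries section_lines out) := by unfold Spec_split_media_entries; infer_instance

-- ===== CLAIM (what is proved, stated in full; the proofs are below) =====
def Claim_equal_split_media_entries : Prop := ∀ (section_lines : List String), Dom_split_media_entries section_lines → Spec_split_media_entries section_lines (split_media_entries section_lines)

-- ===== LEMMAS AND PROOFS =====

-- common reference function: group at markers, recursively
def gsplit : List String → List (List String)
  | [] => []
  | x :: xs =>
    if pvM x then
      (x :: xs.takeWhile (fun l => !pvM l)) :: gsplit (xs.dropWhile (fun l => !pvM l))
    else gsplit xs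
termination_by l => l.length
decreasing_by
  · simpa using Nat.lt_succ_of_le (List.length_dropWhile_le _ _)
  · simp

-- A's loop body and finishing step, named for the proofs (definitionally what the port folds)
def pvStep (st : List (List String) × List String) (ln : String) : List (List String) × List String :=
  if pvM ln then ((if st.2 ≠ [] then st.1 ++ [st.2] else st.1), [ln])
  else (st.1, if st.2 ≠ [] then st.2 ++ [ln] else st.2)

def pvFin (st : List (List String) × List String) : List (List String) :=
  if st.2 ≠ [] then st.1 ++ [st.2] else st.1

theorem A_eq_fold (xs : List String) :
    split_media_entries xs = pvFin (xs.foldl pvStep ([], [])) := rfl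

-- how A consumes lines once `current` is nonempty
def pvH (c : List String) : List String → List (List String)
  | [] => [c]
  | x :: xs => if pvM x then c :: pvH [x] xs else pvH (c ++ [x]) xs

theorem fold_nonempty (xs : List String) :
    ∀ (e : List (List String)) (c : List String), c ≠ [] →
      pvFin (xs.foldl pvStep (e, c)) = e ++ pvH c xs := by
  induction xs with
  | nil => intro e c hc; simp [pvFin, pvH, hc]
  | cons x xs ih =>
    intro e c hc
    by_cases hm : pvM x
    · have : pvStep (e, c) x = (e ++ [c], [x]) := by simp [pvStep, hm, hc]
      simp only [List.foldl_cons, this, ih (e ++ [c]) [x] (by simp), pvH, hm]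
      simp
    · have : pvStep (e, c) x = (e, c ++ [x]) := by simp [pvStep, hm, hc]
      simp only [List.foldl_cons, this, ih e (c ++ [x]) (by simp), pvH, hm]
      simp

theorem pvH_eq (xs : List String) :
    ∀ c : List String,
      pvH c xs = (c ++ xs.takeWhile (fun l => !pvM l)) :: gsplit (xs.dropWhile (fun l => !pvM l)) := by
  induction xs with
  | nil => intro c; simp [pvH, gsplit]
  | cons x xs ih =>
    intro c
    by_cases hm : pvM x
    · simp [pvH, hm, ih, gsplit]
    · simp [pvH, hm, ih]

theorem A_eq_gsplit (xs : List String) : split_media_entries xs = gsplit xs := by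
  rw [A_eq_fold]
  suffices h : ∀ (e : List (List String)), pvFin (xs.foldl pvStep (e, [])) = e ++ gsplit xs by
    simpa using h []
  induction xs with
  | nil => intro e; simp [pvFin, gsplit]
  | cons x xs ih =>
    intro e
    by_cases hm : pvM x
    · have : pvStep (e, []) x = (e, [x]) := by simp [pvStep, hm]
      rw [List.foldl_cons, this, fold_nonempty xs e [x] (by simp), pvH_eq]
      simp [gsplit, hm]
    · have : pvStep (e, []) x = (e, []) := by simp [pvStep, hm]
      rw [List.foldl_cons, this, ih e]
      simp [gsplit, hm]

-- marker indices, as Nats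
def midx : List String → List Nat
  | [] => []
  | x :: xs => if pvM x then 0 :: (midx xs).map (· + 1) else (midx xs).map (· + 1)

theorem map_succ_cast (s : Int) (l : List Nat) :
    (l.map (· + 1)).map (fun n : Nat => s + (n : Int)) = l.map (fun n : Nat => (s + 1) + (n : Int)) := by
  rw [List.map_map]
  refine List.map_congr_left ?_
  intro a _
  simp only [Function.comp]
  push_cast
  ring

theorem enum_filter_eq (xs : List String) :
    ∀ s : Int, ((PySem.List.enumerate xs s).filter (fun p => pvM p.2)).map (fun p => p.1)
      = (midx xs).map (fun n : Nat => s + (n : Int)) := by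
  induction xs with
  | nil => intro s; simp [PySem.List.enumerate_nil, midx]
  | cons x xs ih =>
    intro s
    rw [PySem.List.enumerate_cons, List.filter_cons]
    by_cases hm : pvM x
    · rw [if_pos (by simpa using hm)]
      rw [List.map_cons, ih (s + 1), midx, if_pos hm, List.map_cons, ← map_succ_cast]
      simp
    · rw [if_neg (by simpa using hm)]
      rw [ih (s + 1), midx, if_neg hm, ← map_succ_cast]

-- the slice between consecutive bounds, recursively over the marks list
def pvChain (lines : List String) : List Nat → Nat → List (List String)
  | [], _ => []
  | a :: rest, z => ((lines.drop a).take (rest.headD z - a)) :: pvChain lines rest z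

theorem range_map_eq_chain (lines : List String) (l : List Nat) (z : Nat) :
    (List.range l.length).map (fun k =>
        PySem.List.slice lines (some (((l ++ [z]).map (fun n : Nat => (n : Int))).getD k 0))
          (some (((l ++ [z]).map (fun n : Nat => (n : Int))).getD (k + 1) 0)))
      = pvChain lines l z := by
  induction l with
  | nil => simp [pvChain]
  | cons a rest ih =>
    rw [List.length_cons, List.range_succ_eq_map, List.map_cons, List.map_map]
    have hshift : ∀ k : Nat,
        (((a :: rest) ++ [z]).map (fun n : Nat => (n : Int))).getD (k + 1) 0
          = ((rest ++ [z]).map (fun n : Nat => (n : Int))).getD k 0 := by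
      intro k; simp [List.getD_eq_getElem?_getD]
    have htail : (List.range rest.length).map
        ((fun k => PySem.List.slice lines
            (some ((((a :: rest) ++ [z]).map (fun n : Nat => (n : Int))).getD k 0))
            (some ((((a :: rest) ++ [z]).map (fun n : Nat => (n : Int))).getD (k + 1) 0))) ∘ (· + 1))
        = pvChain lines rest z := by
      rw [← ih]
      refine List.map_congr_left ?_
      intro k _
      simp only [Function.comp, hshift]
    rw [htail]
    show (PySem.List.slice lines
        (some ((((a :: rest) ++ [z]).map (fun n : Nat => (n : Int))).getD 0 0))
        (some ((((a :: rest) ++ [z]).map (fun n : Nat => (n : Int))).getD (0 + 1) 0)))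
        :: pvChain lines rest z = pvChain lines (a :: rest) z
    have h0 : (((a :: rest) ++ [z]).map (fun n : Nat => (n : Int))).getD 0 0 = (a : Int) := by simp
    have h1 : (((a :: rest) ++ [z]).map (fun n : Nat => (n : Int))).getD (0 + 1) 0
        = ((rest.headD z : Nat) : Int) := by
      cases rest <;> simp
    rw [h0, h1, PySem.List.slice_natCast]
    rfl

-- headD of a (+1)-shifted index list against a (+1)-shifted default
theorem headD_map_succ (l : List Nat) (z : Nat) :
    (l.map (· + 1)).headD (z + 1) = l.headD z + 1 := by
  cases l <;> simp

-- shifting every index and the total length by one steps past a cons cell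
theorem pvChain_shift (x : String) (t : List String) (ms : List Nat) (z : Nat) :
    pvChain (x :: t) (ms.map (· + 1)) (z + 1) = pvChain t ms z := by
  induction ms with
  | nil => simp [pvChain]
  | cons a rest ih =>
    simp only [List.map_cons, pvChain, ih, headD_map_succ, List.drop_succ_cons,
      Nat.succ_sub_succ]

-- the first marker index is the length of the marker-free prefix
theorem midx_headD (t : List String) :
    (midx t).headD t.length = (t.takeWhile (fun l => !pvM l)).length := by
  induction t with
  | nil => simp [midx]
  | cons x t ih =>
    rw [midx]
    by_cases hm : pvM x
    · simp [hm]
    · rw [if_neg hm, List.length_cons, headD_map_succ, ih, List.takeWhile_cons]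
      simp [hm]

theorem gsplit_dropWhile (t : List String) :
    gsplit (t.dropWhile (fun l => !pvM l)) = gsplit t := by
  induction t with
  | nil => simp
  | cons x t ih =>
    by_cases hm : pvM x
    · simp [hm]
    · rw [List.dropWhile_cons]
      simp only [hm, Bool.not_false, if_true, ih]
      rw [gsplit]
      simp [hm]

theorem midx_nil_gsplit (t : List String) (h : midx t = []) : gsplit t = [] := by
  induction t with
  | nil => simp [gsplit]
  | cons x t ih =>
    by_cases hm : pvM x
    · simp [midx, hm] at h
    · simp only [midx, if_neg hm, List.map_eq_nil_iff] at h
      rw [gsplit]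
      simp [hm, ih h]

theorem chain_eq_gsplit (lines : List String) :
    pvChain lines (midx lines) lines.length = gsplit lines := by
  induction lines with
  | nil => simp [midx, pvChain, gsplit]
  | cons x t ih =>
    by_cases hm : pvM x
    · rw [midx, if_pos hm, List.length_cons, pvChain, pvChain_shift, ih]
      rw [headD_map_succ, midx_headD, gsplit]
      simp only [hm, if_true, Nat.sub_zero, List.drop_zero, gsplit_dropWhile]
      congr 1
      rw [List.take_succ_cons]
      congr 1
      exact (List.prefix_iff_eq_take.mp (List.takeWhile_prefix _)).symm
    · rw [midx, if_neg hm, List.length_cons, pvChain_shift, ih]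
      rw [gsplit]
      simp [hm]

theorem B_eq_gsplit (xs : List String) : split_media_entries_alt xs = gsplit xs := by
  unfold split_media_entries_alt
  rw [enum_filter_eq xs 0]
  simp only [zero_add]
  by_cases h : midx xs = []
  · simp [h, midx_nil_gsplit xs h]
  · rw [if_neg (by simp [h])]
    have hb : (midx xs).map (fun n : Nat => (n : Int)) ++ [(xs.length : Int)]
        = ((midx xs) ++ [xs.length]).map (fun n : Nat => (n : Int)) := by simp
    simp only [List.length_map, hb]
    rw [range_map_eq_chain xs (midx xs) xs.length, chain_eq_gsplit]

-- ===== VERDICT (by name: the statement is the Claim_ definition above) =====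
theorem split_media_entries_spec : Claim_equal_split_media_entries := by
  intro xs _
  unfold Spec_split_media_entries
  rw [A_eq_gsplit, B_eq_gsplit]
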